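-- pv_equiv track=rewrite | github.com/jradcliffe5/EVNPC_chair | proposal_to_review_template.py | segments_to_network_tokens
-- ===== SOURCE A (Python) =====
-- from typing import Any, Dict, Iterable, List, Optional, Sequence, Set, Tuple
--
-- NETWORK_KEYWORDS = {
--     "EVN",
--     "MERLIN",
--     "VLBA",
--     "MeerKAT",
--     "uGMRT",
--     "NRAO",
--     "LBA",
--     "EAVN",
--     "KVN",
--     "GMVA",
--     "ATCA",
--     "Other",
--     "JVN",
--     "JNET",
--     "e-MERLIN",
-- }
--
-- def segments_to_network_tokens(segments: Sequence[str]) -> List[str]: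
--     """Flatten multi-line network segments into distinct network tokens."""
--     tokens: List[str] = []
--     buffer = ""
--     for segment in segments:
--         segment = segment.strip()
--         if not segment or segment in {",", ";"}:
--             continue
--         parts = [p.strip() for p in segment.split(",") if p.strip()]
--         trailing_comma = segment.endswith(",")
--         if not parts:
--             if trailing_comma and buffer:
--                 if keep_network(buffer) and buffer not in tokens:
--                     tokens.append(buffer)
--                 buffer = ""
--             continue
--         for idx, part in enumerate(parts):
--             if buffer:
--                 if part.upper() == "NRAO" and buffer.lower().endswith("other"):
--                     buffer = f"{buffer} {part}"
--                 elif part.islower() or part == part.lower():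
--                     buffer = f"{buffer} {part}".strip()
--                 else:
--                     if keep_network(buffer) and buffer not in tokens:
--                         tokens.append(buffer)
--                     buffer = part
--             else:
--                 buffer = part
--             if idx < len(parts) - 1 or trailing_comma:
--                 if keep_network(buffer) and buffer not in tokens:
--                     tokens.append(buffer)
--                 buffer = ""
--     if buffer and keep_network(buffer) and buffer not in tokens:
--         tokens.append(buffer)
--     return tokens
--
-- def keep_network(token: str) -> bool:
--     """Return True if the token contains a recognized network keyword."""
--     upper = token.upper()
--     return any(keyword in upper for keyword in NETWORK_KEYWORDS)
-- ===== SOURCE B (Python) =====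
-- from typing import List, Sequence
--
-- NETWORK_KEYWORDS = {
--     "EVN", "MERLIN", "VLBA", "MeerKAT", "uGMRT", "NRAO", "LBA", "EAVN",
--     "KVN", "GMVA", "ATCA", "Other", "JVN", "JNET", "e-MERLIN",
-- }
--
-- def keep_network(token: str) -> bool:
--     upper = token.upper()
--     return any(keyword in upper for keyword in NETWORK_KEYWORDS)
--
-- def segments_to_network_tokens(segments: Sequence[str]) -> List[str]:
--     """Three passes: flatten to (part, flush) events, run the buffer machine
--     collecting every flushed buffer as a raw candidate, then filter+dedup."""
--     # pass 1: flatten segments into events; (None, True) is a forced flush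
--     events = []
--     for segment in segments:
--         s = segment.strip()
--         if not s or s in {",", ";"}:
--             continue
--         parts = [p.strip() for p in s.split(",") if p.strip()]
--         trailing = s.endswith(",")
--         if not parts:
--             if trailing:
--                 events.append((None, True))
--             continue
--         for i, p in enumerate(parts):
--             events.append((p, i < len(parts) - 1 or trailing))
--     # pass 2: buffer state machine, collecting raw candidates unconditionally
--     candidates = []
--     buffer = ""
--     for part, flush in events:
--         if part is None:
--             if buffer:
--                 candidates.append(buffer)
--                 buffer = ""
--             continue
--         if buffer:
--             if part.upper() == "NRAO" and buffer.lower().endswith("other"):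
--                 buffer = f"{buffer} {part}"
--             elif part.islower() or part == part.lower():
--                 buffer = f"{buffer} {part}".strip()
--             else:
--                 candidates.append(buffer)
--                 buffer = part
--         else:
--             buffer = part
--         if flush:
--             candidates.append(buffer)
--             buffer = ""
--     if buffer:
--         candidates.append(buffer)
--     # pass 3: keep recognized tokens, first occurrence wins
--     tokens: List[str] = []
--     for c in candidates:
--         if keep_network(c) and c not in tokens:
--             tokens.append(c)
--     return tokens
-- ===== Notes on version B (the rewrite author's own statement) =====
-- stated objective: alternative
-- what changed: A's single loop that filters and dedups inline while parsing is split into three separate passes: flatten segments into (part, flush) events, run the buffer state machine over the events collecting every flushed buffer unconditionally, then filter with keep_network and dedup (first occurrence wins) in a final pass.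
import Mathlib
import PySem

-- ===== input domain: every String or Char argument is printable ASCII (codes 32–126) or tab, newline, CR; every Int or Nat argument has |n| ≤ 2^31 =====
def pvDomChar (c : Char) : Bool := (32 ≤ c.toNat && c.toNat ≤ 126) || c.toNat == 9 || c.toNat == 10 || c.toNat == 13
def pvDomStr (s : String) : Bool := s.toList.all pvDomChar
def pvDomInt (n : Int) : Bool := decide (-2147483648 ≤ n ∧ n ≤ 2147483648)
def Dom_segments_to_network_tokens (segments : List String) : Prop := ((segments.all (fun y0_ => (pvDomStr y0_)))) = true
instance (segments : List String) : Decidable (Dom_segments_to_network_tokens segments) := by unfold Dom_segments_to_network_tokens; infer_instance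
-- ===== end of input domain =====

-- B separates A's single loop into three passes: flatten the segments into (part, flush) events,
-- run the buffer machine over the events collecting every flushed buffer unconditionally, then
-- filter/dedup in a final pass (objective: alternative decomposition, same cost).

-- ===== PORT A =====
-- shared module constant NETWORK_KEYWORDS (a Python set consumed only by an order-independent `any`)
def pvKeywords : List String :=
  ["EVN", "MERLIN", "VLBA", "MeerKAT", "uGMRT", "NRAO", "LBA", "EAVN",
   "KVN", "GMVA", "ATCA", "Other", "JVN", "JNET", "e-MERLIN"]

-- module helper keep_network (used by both A and B)
def keep_network (token : String) : Bool :=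
  let upper := PySem.Str.upper token
  pvKeywords.any (fun keyword => PySem.Str.isIn keyword upper)

-- str.islower() hand-ported (no PySem string-level primitive): at least one cased character and
-- no uppercase one; exact on the ASCII domain, where the cased characters are the letters.
def pvStrIslower (s : String) : Bool :=
  s.toList.any PySem.Chars.islower && !(s.toList.any PySem.Chars.isupper)

-- [p.strip() for p in seg.split(",") if p.strip()]  (shared expression of both Pythons)
-- seg.split(","): the separator is the literal "," ≠ "", so Str.split? is always `some`
def pvParts (seg : String) : List String :=
  (((PySem.Str.split? seg ",").getD []).map PySem.Str.strip).filter (fun p => p != "")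

-- A's repeated statement: if keep_network(buffer) and buffer not in tokens: tokens.append(buffer)
def pvAflush (tokens : List String) (buffer : String) : List String :=
  if keep_network buffer && !(tokens.contains buffer) then tokens ++ [buffer] else tokens

-- A's inner `for idx, part in enumerate(parts)` body; st = (tokens, buffer)
def pvAinner (n : Nat) (trailing : Bool) (st : List String × String) (ip : Int × String) :
    List String × String :=
  let part := ip.2
  let st1 : List String × String :=
    if st.2 != "" then
      if PySem.Str.upper part == "NRAO" && PySem.Str.endswith (PySem.Str.lower st.2) "other" then
        (st.1, st.2 ++ " " ++ part)
      else if pvStrIslower part || part == PySem.Str.lower part then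
        (st.1, PySem.Str.strip (st.2 ++ " " ++ part))
      else
        (pvAflush st.1 st.2, part)
    else (st.1, part)
  if decide (ip.1 < (n : Int) - 1) || trailing then (pvAflush st1.1 st1.2, "") else st1

-- A's outer `for segment in segments` body
def pvAseg (st : List String × String) (segment : String) : List String × String :=
  let seg := PySem.Str.strip segment
  if seg == "" || seg == "," || seg == ";" then st
  else
    let parts := pvParts seg
    let trailing := PySem.Str.endswith seg ","
    if parts.isEmpty then
      if trailing && st.2 != "" then (pvAflush st.1 st.2, "") else st
    else
      (PySem.List.enumerate parts).foldl (pvAinner parts.length trailing) st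

def segments_to_network_tokens (segments : List String) : List String :=
  let st := segments.foldl pvAseg ([], "")
  if st.2 != "" then pvAflush st.1 st.2 else st.1

-- ===== PORT B =====
-- B pass 1 loop body: extend the event list with this segment's (part, flush) events;
-- (none, true) is the forced-flush event of an empty-parts trailing-comma segment
def pvBseg (evs : List (Option String × Bool)) (segment : String) : List (Option String × Bool) :=
  let s := PySem.Str.strip segment
  if s == "" || s == "," || s == ";" then evs
  else
    let parts := pvParts s
    let trailing := PySem.Str.endswith s ","
    if parts.isEmpty then
      if trailing then evs ++ [(none, true)] else evs
    else
      evs ++ (PySem.List.enumerate parts).map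
        (fun ip => (some ip.2, decide (ip.1 < (parts.length : Int) - 1) || trailing))

-- B pass 2 loop body: buffer machine collecting every flushed buffer; st = (candidates, buffer)
def pvBstep (st : List String × String) (ev : Option String × Bool) : List String × String :=
  match ev.1 with
  | none => if st.2 != "" then (st.1 ++ [st.2], "") else st
  | some part =>
    let st1 : List String × String :=
      if st.2 != "" then
        if PySem.Str.upper part == "NRAO" && PySem.Str.endswith (PySem.Str.lower st.2) "other" then
          (st.1, st.2 ++ " " ++ part)
        else if pvStrIslower part || part == PySem.Str.lower part then
          (st.1, PySem.Str.strip (st.2 ++ " " ++ part))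
        else (st.1 ++ [st.2], part)
      else (st.1, part)
    if ev.2 then (st1.1 ++ [st1.2], "") else st1

def segments_to_network_tokens_alt (segments : List String) : List String :=
  let events := segments.foldl pvBseg []
  let st := events.foldl pvBstep ([], "")
  let cands := if st.2 != "" then st.1 ++ [st.2] else st.1
  -- pass 3: keep recognized tokens, first occurrence wins
  cands.foldl (fun tokens c => if keep_network c && !(tokens.contains c) then tokens ++ [c] else tokens) []

-- ===== PRECONDITION & SPEC =====
def Spec_segments_to_network_tokens (segments : List String) (out : List String) : Prop := out = segments_to_network_tokens_alt segments
instance (segments : List String) (out : List String) : Decidable (Spec_segments_to_network_tokens segments out) := by unfold Spec_segments_to_network_tokens; infer_instance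

-- ===== CLAIM (what is proved, stated in full; the proofs are below) =====
def Claim_equal_segments_to_network_tokens : Prop := ∀ (segments : List String), Dom_segments_to_network_tokens segments → Spec_segments_to_network_tokens segments (segments_to_network_tokens segments)

-- ===== LEMMAS AND PROOFS =====

-- B's filter/dedup pass, as a function of the candidate list
def pvD (cands : List String) : List String :=
  cands.foldl (fun tokens c => if keep_network c && !(tokens.contains c) then tokens ++ [c] else tokens) []

lemma pvD_append_one (c : List String) (b : String) : pvD (c ++ [b]) = pvAflush (pvD c) b := by
  simp [pvD, List.foldl_append, pvAflush]

-- pass 1 appends a per-segment chunk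
lemma pvBseg_eq (evs : List (Option String × Bool)) (s : String) :
    pvBseg evs s = evs ++ pvBseg [] s := by
  simp only [pvBseg]
  by_cases h0 : (PySem.Str.strip s == "" || PySem.Str.strip s == ","
      || PySem.Str.strip s == ";") = true
  · rw [if_pos h0, if_pos h0, List.append_nil]
  · rw [if_neg h0, if_neg h0]
    by_cases hp : (pvParts (PySem.Str.strip s)).isEmpty = true
    · rw [if_pos hp, if_pos hp]
      by_cases ht : PySem.Str.endswith (PySem.Str.strip s) "," = true
      · rw [if_pos ht, if_pos ht, List.nil_append]
      · rw [if_neg ht, if_neg ht, List.append_nil]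
    · rw [if_neg hp, if_neg hp, List.nil_append]

-- per-part step correspondence
lemma pvElem (n : Nat) (trailing : Bool) (c : List String) (b : String) (ip : Int × String) :
    pvAinner n trailing (pvD c, b) ip
      = (pvD (pvBstep (c, b) (some ip.2, decide (ip.1 < (n : Int) - 1) || trailing)).1,
         (pvBstep (c, b) (some ip.2, decide (ip.1 < (n : Int) - 1) || trailing)).2) := by
  simp only [pvAinner, pvBstep]
  split_ifs <;> dsimp only <;>
    first
      | rw [pvD_append_one, pvD_append_one]
      | rw [pvD_append_one]

-- pvBstep at the forced-flush event, unfolded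
lemma pvBstep_none (st : List String × String) :
    pvBstep st (none, true) = if st.2 != "" then (st.1 ++ [st.2], "") else st := rfl

-- inner loop correspondence
lemma pvInner (n : Nat) (trailing : Bool) :
    ∀ (l : List (Int × String)) (c : List String) (b : String),
      l.foldl (pvAinner n trailing) (pvD c, b)
        = (pvD ((l.map (fun ip => (some ip.2, decide (ip.1 < (n : Int) - 1) || trailing))).foldl
              pvBstep (c, b)).1,
           ((l.map (fun ip => (some ip.2, decide (ip.1 < (n : Int) - 1) || trailing))).foldl
              pvBstep (c, b)).2) := by
  intro l
  induction l with
  | nil => intro c b; simp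
  | cons ip tl ih =>
    intro c b
    simp only [List.foldl_cons, List.map_cons]
    rw [pvElem]
    rw [ih]

-- per-segment correspondence
lemma pvSegStep (s : String) (c : List String) (b : String) :
    pvAseg (pvD c, b) s
      = (pvD ((pvBseg [] s).foldl pvBstep (c, b)).1, ((pvBseg [] s).foldl pvBstep (c, b)).2) := by
  simp only [pvAseg, pvBseg]
  by_cases h0 : (PySem.Str.strip s == "" || PySem.Str.strip s == ","
      || PySem.Str.strip s == ";") = true
  · rw [if_pos h0, if_pos h0]; rfl
  · rw [if_neg h0, if_neg h0]
    by_cases hp : (pvParts (PySem.Str.strip s)).isEmpty = true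
    · rw [if_pos hp, if_pos hp]
      by_cases ht : PySem.Str.endswith (PySem.Str.strip s) "," = true
      · rw [if_pos ht]
        simp only [List.nil_append, List.foldl_cons, List.foldl_nil, pvBstep_none]
        by_cases hb : (b != "") = true
        · have hA : (PySem.Str.endswith (PySem.Str.strip s) "," && (b != "")) = true := by
            rw [ht, hb]; rfl
          rw [if_pos hA, if_pos hb]
          dsimp only
          rw [pvD_append_one]
        · have hA : ¬ ((PySem.Str.endswith (PySem.Str.strip s) "," && (b != "")) = true) := by
            simp only [Bool.not_eq_true] at hb ⊢
            rw [hb, Bool.and_false]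
          rw [if_neg hA, if_neg hb]
      · have hA : ¬ ((PySem.Str.endswith (PySem.Str.strip s) "," && (b != "")) = true) := by
          simp only [Bool.not_eq_true] at ht ⊢
          rw [ht, Bool.false_and]
        rw [if_neg ht, if_neg hA]
        rfl
    · rw [if_neg hp, if_neg hp]
      simpa only [List.nil_append] using pvInner (pvParts (PySem.Str.strip s)).length
        (PySem.Str.endswith (PySem.Str.strip s) ",") (PySem.List.enumerate (pvParts (PySem.Str.strip s))) c b

-- whole-input correspondence
lemma pvMain : ∀ (segs : List String) (c : List String) (b : String),
    segs.foldl pvAseg (pvD c, b)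
      = (pvD ((segs.flatMap (pvBseg [])).foldl pvBstep (c, b)).1,
         ((segs.flatMap (pvBseg [])).foldl pvBstep (c, b)).2) := by
  intro segs
  induction segs with
  | nil => intro c b; simp
  | cons s tl ih =>
    intro c b
    simp only [List.foldl_cons, List.flatMap_cons, List.foldl_append]
    rw [pvSegStep, ih]

lemma pvEvents (segs : List String) : segs.foldl pvBseg [] = segs.flatMap (pvBseg []) := by
  have h := PySem.List.foldl_congr_mem
      (f := pvBseg) (g := fun evs s => evs ++ pvBseg [] s) (init := ([] : List (Option String × Bool)))
      (l := segs) (fun acc x _ => pvBseg_eq acc x)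
  rw [h, PySem.List.foldl_append_eq_flatMap]
  simp

-- ===== VERDICT (by name: the statement is the Claim_ definition above) =====
theorem segments_to_network_tokens_spec : Claim_equal_segments_to_network_tokens := by
  intro segs _
  show segments_to_network_tokens segs = segments_to_network_tokens_alt segs
  simp only [segments_to_network_tokens, segments_to_network_tokens_alt]
  rw [pvEvents]
  have hM := pvMain segs [] ""
  rw [show (pvD [] : List String) = [] from rfl] at hM
  rw [hM]
  rcases hE : List.foldl pvBstep ([], "") (List.flatMap (pvBseg []) segs) with ⟨c1, b1⟩
  dsimp only
  by_cases hb : (b1 != "") = true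
  · rw [if_pos hb, if_pos hb]
    exact (pvD_append_one c1 b1).symm
  · rw [if_neg hb, if_neg hb]
    rfl
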